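-- pv_equiv track=rewrite | github.com/pypi-data/pypi-mirror-404 | packages/cailculator-mcp/cailculator_mcp-1.4.2.tar.gz/cailculator_mcp-1.4.2/src/cailculator_mcp/e8_utils.py | match_canonical_pattern
-- ===== SOURCE A (Python) =====
-- from typing import List, Dict, Tuple, Optional
--
-- def match_canonical_pattern(
--     indices: List[int],
--     pattern_indices: List[int],
--     allow_offset: bool = True
-- ) -> bool:
--     """
--     Check if a set of indices matches a Canonical Six pattern.
--
--     Args:
--         indices: Indices from zero divisor pair
--         pattern_indices: Canonical pattern indices
--         allow_offset: Allow patterns with index offset (structural match)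
--
--     Returns:
--         True if matches
--     """
--     if len(indices) != len(pattern_indices):
--         return False
--
--     # Exact match
--     if sorted(indices) == sorted(pattern_indices):
--         return True
--
--     # Structural match (same relative positions)
--     if allow_offset and len(indices) == len(pattern_indices):
--         sorted_indices = sorted(indices)
--         sorted_pattern = sorted(pattern_indices)
--
--         # Check if differences are consistent (same offset)
--         offsets = [sorted_indices[i] - sorted_pattern[i] for i in range(len(indices))]
--         if len(set(offsets)) == 1:  # All same offset
--             return True
--
--     return False
-- ===== SOURCE B (Python) =====
-- def _counts(xs):
--     c = {}
--     for x in xs: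
--         c[x] = c.get(x, 0) + 1
--     return c
--
--
-- def match_canonical_pattern(indices, pattern_indices, allow_offset=True):
--     n = len(indices)
--     if n != len(pattern_indices):
--         return False
--     if n == 0:
--         return True
--     if allow_offset:
--         # a consistent offset is forced to be the mean difference of the sums
--         diff = sum(indices) - sum(pattern_indices)
--         if diff % n != 0:
--             return False
--         d = diff // n
--         return _counts([x - d for x in indices]) == _counts(pattern_indices)
--     return _counts(indices) == _counts(pattern_indices)
-- ===== Notes on version B (the rewrite author's own statement) =====
-- stated objective: alternative
-- what changed: B never sorts: it compares hash multisets (dict counters) and, for the offset case, derives the unique candidate offset in closed form as (sum(indices)-sum(pattern))//n (rejecting when the difference is not divisible by n), instead of A's sort-both-lists, exact compare, then offsets-list + set-cardinality test.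
import Mathlib
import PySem

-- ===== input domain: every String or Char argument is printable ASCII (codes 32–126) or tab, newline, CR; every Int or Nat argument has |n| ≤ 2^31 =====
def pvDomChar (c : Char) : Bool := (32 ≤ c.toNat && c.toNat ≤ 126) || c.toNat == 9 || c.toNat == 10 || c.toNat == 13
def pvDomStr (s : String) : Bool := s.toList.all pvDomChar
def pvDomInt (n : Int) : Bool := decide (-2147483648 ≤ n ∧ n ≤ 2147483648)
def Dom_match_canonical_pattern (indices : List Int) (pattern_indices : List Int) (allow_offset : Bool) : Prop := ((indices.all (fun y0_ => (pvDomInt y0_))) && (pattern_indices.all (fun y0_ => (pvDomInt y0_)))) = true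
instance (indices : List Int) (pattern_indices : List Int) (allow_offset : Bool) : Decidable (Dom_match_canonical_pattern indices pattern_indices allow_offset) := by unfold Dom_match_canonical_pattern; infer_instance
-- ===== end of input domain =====

-- B replaces A's sort-based comparison (sort both, exact compare, offsets list + set cardinality)
-- by dict-counter multiset comparison with the candidate offset derived in closed form from the
-- two sums; objective: alternative (no speed claim).

-- ===== PORT A =====
def match_canonical_pattern (indices : List Int) (pattern_indices : List Int) (allow_offset : Bool) : Bool :=
  if indices.length ≠ pattern_indices.length then false
  else if PySem.List.sorted indices (fun x => x) false == PySem.List.sorted pattern_indices (fun x => x) false then true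
  else if allow_offset && (indices.length == pattern_indices.length) then
    let sorted_indices := PySem.List.sorted indices (fun x => x) false
    let sorted_pattern := PySem.List.sorted pattern_indices (fun x => x) false
    -- the comprehension indices i are always in range, so pyGetD is exact here
    let offsets := (PySem.List.pyRange 0 (indices.length : Int) 1).map
      (fun i => PySem.List.pyGetD sorted_indices i 0 - PySem.List.pyGetD sorted_pattern i 0)
    if (PySem.Set.ofList offsets).length == 1 then true else false
  else false

-- ===== PORT B =====
-- _counts: the dict-building loop of Source B (equals PySem.Dict.counter by rfl)
def pvCounts (xs : List Int) : PySem.Dict Int Int :=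
  xs.foldl (fun c x => c.insert x (c.getD x 0 + 1)) PySem.Dict.empty

-- Python's `d1 == d2` on dicts: same keys as a set and the same value at every key (exact:
-- key sets equal makes getD with default 0 the stored value on both sides)
def pvDictEqInt (d1 d2 : PySem.Dict Int Int) : Bool :=
  PySem.Set.equal d1.keys d2.keys && d1.keys.all (fun k => d1.getD k 0 == d2.getD k 0)

def match_canonical_pattern_alt (indices : List Int) (pattern_indices : List Int) (allow_offset : Bool) : Bool :=
  if indices.length ≠ pattern_indices.length then false
  else if indices.length == 0 then true
  else if allow_offset then
    let diff := indices.sum - pattern_indices.sum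
    if PySem.Int.mod diff (indices.length : Int) ≠ 0 then false
    else
      let d := PySem.Int.floordiv diff (indices.length : Int)
      pvDictEqInt (pvCounts (indices.map (fun x => x - d))) (pvCounts pattern_indices)
  else pvDictEqInt (pvCounts indices) (pvCounts pattern_indices)

-- ===== PRECONDITION & SPEC =====
def Spec_match_canonical_pattern (indices : List Int) (pattern_indices : List Int) (allow_offset : Bool) (out : Bool) : Prop := out = match_canonical_pattern_alt indices pattern_indices allow_offset
instance (indices : List Int) (pattern_indices : List Int) (allow_offset : Bool) (out : Bool) : Decidable (Spec_match_canonical_pattern indices pattern_indices allow_offset out) := by unfold Spec_match_canonical_pattern; infer_instance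

-- ===== CLAIM (what is proved, stated in full; the proofs are below) =====
def Claim_equal_match_canonical_pattern : Prop := ∀ (indices : List Int) (pattern_indices : List Int) (allow_offset : Bool), Dom_match_canonical_pattern indices pattern_indices allow_offset → Spec_match_canonical_pattern indices pattern_indices allow_offset (match_canonical_pattern indices pattern_indices allow_offset)


-- ===== LEMMAS AND PROOFS =====

-- the sum of a constant-shifted list, in closed form
lemma sum_map_sub (u : List Int) (d : Int) :
    (u.map (fun x => x - d)).sum = u.sum - (u.length : Int) * d := by
  induction u with
  | nil => simp
  | cons x xs ih =>
    simp only [List.map_cons, List.sum_cons, List.length_cons, ih]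
    push_cast
    ring

-- a constant shift matches pointwise iff every pairwise difference is that constant
lemma map_sub_eq_iff (d : Int) (u v : List Int) (h : u.length = v.length) :
    u.map (fun x => x - d) = v ↔ ∀ z ∈ List.zipWith (fun x y => x - y) u v, z = d := by
  induction u generalizing v with
  | nil =>
    cases v with
    | nil => simp
    | cons y ys => simp at h
  | cons x xs ih =>
    cases v with
    | nil => simp at h
    | cons y ys =>
      simp only [List.map_cons, List.zipWith_cons_cons, List.cons.injEq, List.forall_mem_cons]
      rw [ih ys (by simpa using h)]
      constructor <;> rintro ⟨h1, h2⟩ <;> exact ⟨by omega, h2⟩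

lemma zip_sub_self (s : List Int) : ∀ x ∈ List.zipWith (fun a b => a - b) s s, x = 0 := by
  induction s with
  | nil => simp
  | cons a t ih => simpa using ih

-- B's dict-counter equality IS multiset equality
lemma dictEq_counts_iff_perm (xs ys : List Int) :
    pvDictEqInt (pvCounts xs) (pvCounts ys) = true ↔ xs.Perm ys := by
  unfold pvDictEqInt pvCounts
  rw [PySem.Dict.foldl_insert_getD_add_one_eq_counter,
      PySem.Dict.foldl_insert_getD_add_one_eq_counter, Bool.and_eq_true,
      PySem.Dict.keys_counter, PySem.Dict.keys_counter, PySem.Set.equal_iff, List.all_eq_true]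
  constructor
  · rintro ⟨h1, h2⟩
    rw [List.perm_iff_count]
    intro a
    by_cases ha : a ∈ xs
    · have hmem : a ∈ PySem.Set.ofList xs := by simp [PySem.Set.mem_ofList, ha]
      have := h2 a hmem
      simp only [PySem.Dict.getD_counter, beq_iff_eq, Nat.cast_inj] at this
      exact this
    · have hb : a ∉ ys := by
        intro hy
        exact ha (by simpa [PySem.Set.mem_ofList] using (h1 a).mpr (by simp [PySem.Set.mem_ofList, hy]))
      rw [List.count_eq_zero.mpr ha, List.count_eq_zero.mpr hb]
  · intro hp
    have hc := List.perm_iff_count.mp hp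
    refine ⟨fun x => by simp [PySem.Set.mem_ofList, hp.mem_iff], fun k _ => ?_⟩
    simp only [PySem.Dict.getD_counter, beq_iff_eq, Nat.cast_inj]
    exact hc k

-- A's offsets comprehension is pointwise subtraction of the two equally long sorted lists
lemma offsets_eq_zipWith (si sp : List Int) (h : si.length = sp.length) :
    (PySem.List.pyRange 0 (si.length : Int) 1).map
      (fun i => PySem.List.pyGetD si i 0 - PySem.List.pyGetD sp i 0)
    = List.zipWith (fun x y => x - y) si sp := by
  apply List.ext_getElem
  · simp [PySem.List.length_pyRange_one, h]
  · intro k h1 h2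
    have hk : k < si.length := by
      simpa [PySem.List.length_pyRange_one] using h1
    simp [PySem.List.getElem_pyRange_one, List.getD_eq_getElem?_getD, hk, h ▸ hk]

-- the same, with the pyRange bound written as A writes it (the unsorted list's length)
lemma offsets_eq_zipWith' (indices pattern : List Int) (h : indices.length = pattern.length) :
    (PySem.List.pyRange 0 (indices.length : Int) 1).map
      (fun i => PySem.List.pyGetD (PySem.List.sorted indices (fun x => x) false) i 0
              - PySem.List.pyGetD (PySem.List.sorted pattern (fun x => x) false) i 0)
    = List.zipWith (fun x y => x - y) (PySem.List.sorted indices (fun x => x) false)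
        (PySem.List.sorted pattern (fun x => x) false) := by
  have h2 := offsets_eq_zipWith (PySem.List.sorted indices (fun x => x) false)
    (PySem.List.sorted pattern (fun x => x) false)
    (by rw [PySem.List.length_sorted, PySem.List.length_sorted, h])
  rw [← h2]
  congr 2
  rw [PySem.List.length_sorted]

-- a nonempty list dedups to a singleton iff all its elements equal its head
lemma dedup_length_one_iff (o : Int) (os : List Int) :
    (PySem.Set.ofList (o :: os)).length = 1 ↔ ∀ x ∈ os, x = o := by
  constructor
  · intro h1 x hx
    obtain ⟨c, hc⟩ := List.length_eq_one_iff.mp h1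
    have ho : o ∈ PySem.Set.ofList (o :: os) := by simp [PySem.Set.mem_ofList]
    have hx' : x ∈ PySem.Set.ofList (o :: os) := by simp [PySem.Set.mem_ofList, hx]
    rw [hc] at ho hx'
    simp at ho hx'
    omega
  · intro hall
    have hmem : ∀ y ∈ PySem.Set.ofList (o :: os), y = o := by
      intro y hy
      have hy2 := List.mem_cons.mp ((PySem.Set.mem_ofList _ _).mp hy)
      cases hy2 with
      | inl h2 => exact h2
      | inr h2 => exact hall y h2
    have hnd := PySem.Set.nodup_ofList (o :: os)
    have ho : o ∈ PySem.Set.ofList (o :: os) := by simp [PySem.Set.mem_ofList]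
    rcases hl : PySem.Set.ofList (o :: os) with _ | ⟨x, _ | ⟨y, rest⟩⟩
    · rw [hl] at ho; simp at ho
    · simp
    · exfalso
      rw [hl] at hmem hnd
      have hx := hmem x (by simp)
      have hy := hmem y (by simp)
      simp [hx, hy] at hnd

-- shifting a list by a constant commutes with sorting
lemma sorted_map_sub (xs : List Int) (d : Int) :
    PySem.List.sorted (xs.map (fun x => x - d)) (fun x => x) false
      = (PySem.List.sorted xs (fun x => x) false).map (fun x => x - d) := by
  apply PySem.List.sorted_id_eq_of_perm_of_pairwise
  · exact (PySem.List.sorted_perm xs (fun x => x) false).map _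
  · exact List.Pairwise.map _ (fun a b h => by omega) (PySem.List.sorted_pairwise xs (fun x => x))

-- the shifted multiset matches iff the sorted lists differ pointwise by d
lemma shift_perm_iff (indices pattern : List Int) (d : Int) :
    (indices.map (fun x => x - d)).Perm pattern ↔
      (PySem.List.sorted indices (fun x => x) false).map (fun x => x - d)
        = PySem.List.sorted pattern (fun x => x) false := by
  rw [← PySem.List.sorted_id_eq_sorted_id_iff_perm, sorted_map_sub]

-- A's two match conditions collapse to one pointwise constant shift
lemma core_map (m n0 : Int) (s t : List Int) (hst : s.length = t.length)
    (h : (m :: s = n0 :: t) ∨ ∀ x ∈ List.zipWith (fun a b => a - b) s t, x = m - n0) :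
    (m :: s).map (fun x => x - (m - n0)) = n0 :: t := by
  rw [map_sub_eq_iff _ _ _ (by simp [hst]), List.zipWith_cons_cons, List.forall_mem_cons]
  refine ⟨by ring, ?_⟩
  rcases h with heq | hall
  · injection heq with hm hs
    subst hs
    intro x hx
    have := zip_sub_self s x hx
    omega
  · exact hall

-- a pointwise constant shift of the sorted lists fixes the difference of the sums
lemma shift_sum (indices pattern : List Int) (c m n0 : Int) (s t : List Int)
    (hsi : PySem.List.sorted indices (fun x => x) false = m :: s)
    (hsp : PySem.List.sorted pattern (fun x => x) false = n0 :: t)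
    (hmap : (m :: s).map (fun x => x - c) = n0 :: t) :
    indices.sum - pattern.sum = (indices.length : Int) * c := by
  have h1 : (m :: s).sum = indices.sum := (hsi ▸ PySem.List.sorted_perm indices (fun x => x) false).sum_eq
  have h2 : (n0 :: t).sum = pattern.sum := (hsp ▸ PySem.List.sorted_perm pattern (fun x => x) false).sum_eq
  have h3 : (((m :: s).length : Int)) = (indices.length : Int) := by
    rw [← hsi, PySem.List.length_sorted]
  have h4 := sum_map_sub (m :: s) c
  rw [hmap, h3] at h4
  linarith [h1, h2, h4]

-- whenever A matches, the sum difference is divisible by the length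
lemma cons_mod (indices pattern : List Int) (m n0 : Int) (s t : List Int)
    (hsi : PySem.List.sorted indices (fun x => x) false = m :: s)
    (hsp : PySem.List.sorted pattern (fun x => x) false = n0 :: t)
    (hst : s.length = t.length)
    (h : (m :: s = n0 :: t) ∨ ∀ x ∈ List.zipWith (fun a b => a - b) s t, x = m - n0) :
    PySem.Int.mod (indices.sum - pattern.sum) (indices.length : Int) = 0 := by
  have hmap := core_map m n0 s t hst h
  rw [PySem.Int.mod_eq_zero_iff_dvd, shift_sum indices pattern (m - n0) m n0 s t hsi hsp hmap]
  exact Dvd.intro _ rfl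

-- the heart: A's disjunction is B's shifted-multiset match (given divisibility)
lemma cons_core (indices pattern : List Int) (hlen : indices.length = pattern.length)
    (m n0 : Int) (s t : List Int)
    (hsi : PySem.List.sorted indices (fun x => x) false = m :: s)
    (hsp : PySem.List.sorted pattern (fun x => x) false = n0 :: t) :
    ((m :: s = n0 :: t) ∨ ∀ x ∈ List.zipWith (fun a b => a - b) s t, x = m - n0) ↔
    (indices.map (fun x => x -
        PySem.Int.floordiv (indices.sum - pattern.sum) (indices.length : Int))).Perm pattern := by
  have hnil : indices ≠ [] := by
    intro h0
    rw [h0, (PySem.List.sorted_eq_nil_iff ([] : List Int) (fun x => x) false).mpr rfl] at hsi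
    simp at hsi
  have hNpos : (0 : Int) < (indices.length : Int) := by
    exact_mod_cast Nat.pos_of_ne_zero (fun h0 => hnil (List.length_eq_zero_iff.mp h0))
  have hst : s.length = t.length := by
    have h2 := hlen
    rw [← PySem.List.length_sorted indices (fun x => x) false,
        ← PySem.List.length_sorted pattern (fun x => x) false, hsi, hsp] at h2
    simpa using h2
  rw [shift_perm_iff, hsi, hsp, map_sub_eq_iff _ _ _ (by simp [hst]),
      List.zipWith_cons_cons, List.forall_mem_cons]
  constructor
  · intro h
    have hmap := core_map m n0 s t hst h
    have hd : PySem.Int.floordiv (indices.sum - pattern.sum) (indices.length : Int) = m - n0 := by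
      rw [shift_sum indices pattern (m - n0) m n0 s t hsi hsp hmap,
          PySem.Int.floordiv_eq_ediv_of_pos hNpos, Int.mul_ediv_cancel_left _ (ne_of_gt hNpos)]
    rw [hd]
    have hmap' := (map_sub_eq_iff (m - n0) (m :: s) (n0 :: t) (by simp [hst])).mp hmap
    rw [List.zipWith_cons_cons, List.forall_mem_cons] at hmap'
    exact hmap'
  · rintro ⟨h1, h2⟩
    right
    intro x hx
    have := h2 x hx
    omega

theorem ports_eq (indices pattern_indices : List Int) (allow_offset : Bool) :
    match_canonical_pattern indices pattern_indices allow_offset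
      = match_canonical_pattern_alt indices pattern_indices allow_offset := by
  unfold match_canonical_pattern match_canonical_pattern_alt
  by_cases hlen : indices.length = pattern_indices.length
  · have h1 : ¬(indices.length ≠ pattern_indices.length) := by simp [hlen]
    rw [if_neg h1, if_neg h1]
    by_cases hnil : indices = []
    · have hp : pattern_indices = [] := by
        rw [hnil] at hlen
        exact List.length_eq_zero_iff.mp hlen.symm
      subst hnil
      subst hp
      cases allow_offset <;> rfl
    · rw [if_neg (show ¬((indices.length == 0) = true) from by simp [hnil])]
      have hbeq : (indices.length == pattern_indices.length) = true := by simp [hlen]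
      simp only [hbeq, Bool.and_true]
      obtain ⟨m, s, hsi⟩ : ∃ m s, PySem.List.sorted indices (fun x => x) false = m :: s := by
        cases h : PySem.List.sorted indices (fun x => x) false with
        | nil => exact absurd ((PySem.List.sorted_eq_nil_iff indices (fun x => x) false).mp h) hnil
        | cons a b => exact ⟨a, b, rfl⟩
      have hpnil : pattern_indices ≠ [] := by
        intro h0
        rw [h0] at hlen
        exact hnil (List.length_eq_zero_iff.mp hlen)
      obtain ⟨n0, t, hsp⟩ : ∃ n0 t, PySem.List.sorted pattern_indices (fun x => x) false = n0 :: t := by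
        cases h : PySem.List.sorted pattern_indices (fun x => x) false with
        | nil => exact absurd ((PySem.List.sorted_eq_nil_iff pattern_indices (fun x => x) false).mp h) hpnil
        | cons a b => exact ⟨a, b, rfl⟩
      have hst : s.length = t.length := by
        have h2 := hlen
        rw [← PySem.List.length_sorted indices (fun x => x) false,
            ← PySem.List.length_sorted pattern_indices (fun x => x) false, hsi, hsp] at h2
        simpa using h2
      cases allow_offset with
      | false =>
        rw [if_neg (show ¬((false : Bool) = true) from by simp),
            if_neg (show ¬((false : Bool) = true) from by simp)]
        rw [Bool.eq_iff_iff, dictEq_counts_iff_perm, ← PySem.List.sorted_id_eq_sorted_id_iff_perm,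
            hsi, hsp]
        simp
      | true =>
        rw [if_pos (show (true : Bool) = true from rfl),
            if_pos (show (true : Bool) = true from rfl)]
        rw [offsets_eq_zipWith' indices pattern_indices hlen, hsi, hsp, List.zipWith_cons_cons]
        have hcore := cons_core indices pattern_indices hlen m n0 s t hsi hsp
        by_cases hmod : PySem.Int.mod (indices.sum - pattern_indices.sum) (indices.length : Int) = 0
        · rw [if_neg (not_not_intro hmod)]
          by_cases heq : m :: s = n0 :: t
          · rw [if_pos (by simpa using heq)]
            exact ((dictEq_counts_iff_perm _ _).mpr (hcore.mp (Or.inl heq))).symm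
          · rw [if_neg (by simpa using heq)]
            by_cases hone : (PySem.Set.ofList ((m - n0) :: List.zipWith (fun a b => a - b) s t)).length = 1
            · rw [if_pos (by simpa using hone)]
              exact ((dictEq_counts_iff_perm _ _).mpr
                (hcore.mp (Or.inr ((dedup_length_one_iff _ _).mp hone)))).symm
            · rw [if_neg (by simpa using hone)]
              by_contra hcon
              have hB : pvDictEqInt (pvCounts (indices.map (fun x => x -
                  PySem.Int.floordiv (indices.sum - pattern_indices.sum) (indices.length : Int))))
                  (pvCounts pattern_indices) = true := by
                cases h : pvDictEqInt (pvCounts (indices.map (fun x => x -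
                    PySem.Int.floordiv (indices.sum - pattern_indices.sum) (indices.length : Int))))
                    (pvCounts pattern_indices)
                · rw [h] at hcon; simp at hcon
                · rfl
              rcases hcore.mpr ((dictEq_counts_iff_perm _ _).mp hB) with heq2 | hall2
              · exact heq heq2
              · exact hone ((dedup_length_one_iff _ _).mpr hall2)
        · rw [if_pos hmod]
          have hA : ¬(m :: s = n0 :: t) := fun heq =>
            hmod (cons_mod indices pattern_indices m n0 s t hsi hsp hst (Or.inl heq))
          have hone : ¬((PySem.Set.ofList ((m - n0) :: List.zipWith (fun a b => a - b) s t)).length = 1) :=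
            fun hone => hmod (cons_mod indices pattern_indices m n0 s t hsi hsp hst
              (Or.inr ((dedup_length_one_iff _ _).mp hone)))
          rw [if_neg (by simpa using hA), if_neg (by simpa using hone)]
  · simp [hlen]

-- ===== VERDICT (by name: the statement is the Claim_ definition above) =====
theorem match_canonical_pattern_spec : Claim_equal_match_canonical_pattern := by
  intro indices pattern_indices allow_offset _
  unfold Spec_match_canonical_pattern
  exact ports_eq indices pattern_indices allow_offset
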